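-- pv_equiv track=rewrite | github.com/tamara-git/Algo1 | Guía7/ejercicio1.py | long_mayorASiete
-- ===== SOURCE A (Python) =====
-- def long_mayorASiete(lista_de_palabras: list[str]) -> bool:
--     res: bool = False
--     for i in range(len(lista_de_palabras)):
--         if len(lista_de_palabras[i]) <= 7:
--             res = False
--         else:
--             res = True
--     return res
-- ===== SOURCE B (Python) =====
-- def long_mayorASiete(lista_de_palabras: list[str]) -> bool:
--     if lista_de_palabras:
--         return len(lista_de_palabras[-1]) > 7
--     return False
-- ===== Notes on version B (the rewrite author's own statement) =====
-- stated objective: simpler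
-- what changed: B reads only the last element (the loop's final overwrite is the whole result) instead of A's O(n) scan that recomputes and overwrites the flag for every word.
import Mathlib
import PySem

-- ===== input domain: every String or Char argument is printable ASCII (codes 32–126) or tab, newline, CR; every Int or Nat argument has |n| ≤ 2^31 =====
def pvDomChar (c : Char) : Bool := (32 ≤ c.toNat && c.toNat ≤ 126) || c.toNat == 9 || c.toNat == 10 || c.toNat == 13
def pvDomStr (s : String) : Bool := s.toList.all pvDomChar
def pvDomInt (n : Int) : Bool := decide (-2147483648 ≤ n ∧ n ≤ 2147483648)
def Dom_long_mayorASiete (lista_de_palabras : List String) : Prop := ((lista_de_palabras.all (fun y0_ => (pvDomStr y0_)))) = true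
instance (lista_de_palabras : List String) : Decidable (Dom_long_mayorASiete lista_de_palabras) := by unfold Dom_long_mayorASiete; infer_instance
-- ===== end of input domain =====

-- B replaces A's whole-list overwriting scan with a single read of the last element (simpler, O(1) accesses).


-- ===== PORT A =====
def long_mayorASiete (lista_de_palabras : List String) : Bool :=
  (PySem.List.pyRange 0 (lista_de_palabras.length : Int) 1).foldl
    (fun _res i =>
      if PySem.Str.len (PySem.List.pyGetD lista_de_palabras i "") ≤ 7 then false else true)
    false

-- ===== PORT B =====
def long_mayorASiete_alt (lista_de_palabras : List String) : Bool :=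
  match lista_de_palabras.getLast? with
  | none => false
  | some w => decide (7 < PySem.Str.len w)

-- ===== PRECONDITION & SPEC =====
def Spec_long_mayorASiete (lista_de_palabras : List String) (out : Bool) : Prop := out = long_mayorASiete_alt lista_de_palabras
instance (lista_de_palabras : List String) (out : Bool) : Decidable (Spec_long_mayorASiete lista_de_palabras out) := by unfold Spec_long_mayorASiete; infer_instance

-- ===== CLAIM (what is proved, stated in full; the proofs are below) =====
def Claim_equal_long_mayorASiete : Prop := ∀ (lista_de_palabras : List String), Dom_long_mayorASiete lista_de_palabras → Spec_long_mayorASiete lista_de_palabras (long_mayorASiete lista_de_palabras)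

-- ===== LEMMAS AND PROOFS =====

-- A's loop overwrites the flag at every step, so the fold equals the flag of the last element.
theorem foldl_overwrite {α : Type} (g : α → Bool) (init : Bool) (xs : List α) :
    xs.foldl (fun _ w => g w) init = (xs.getLast?).elim init g := by
  induction xs generalizing init with
  | nil => rfl
  | cons x xs ih =>
    cases xs with
    | nil => rfl
    | cons y ys => simpa using ih (g x)

-- ===== VERDICT (by name: the statement is the Claim_ definition above) =====
theorem long_mayorASiete_spec : Claim_equal_long_mayorASiete := by
  intro l _
  unfold Spec_long_mayorASiete long_mayorASiete long_mayorASiete_alt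
  rw [PySem.List.foldl_pyRange_zero_pyGetD' l "" (fun res w => if PySem.Str.len w ≤ 7 then false else true) false,
      foldl_overwrite]
  cases h : l.getLast? with
  | none => simp
  | some w => simp only [Option.elim]; split <;> simp_all
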